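-- pv_equiv track=rewrite | github.com/KutsenkoDmytro/python_oop_balakirev_course | 4_nasledovanie_v_oop/4_8_ispytanie_bremya_naslediya/ex_4_8.py | __get_full_path_vert
-- ===== SOURCE A (Python) =====
-- def __get_full_path_vert(neighb_dict:dict):
--     '''Формирует полный путь (вершины) од начальной до конечной вершини (словарь для всех вершин).'''
--     dict_path = {}
--     for i in neighb_dict.keys():
--         lst = []
--         k = i
--         while neighb_dict[k]:
--             lst.append(neighb_dict[k])
--             k = lst[-1]
--         lst.insert(0, i)
--         dict_path[i] = lst[::-1]
--     return dict_path
-- ===== SOURCE B (Python) =====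
-- def __get_full_path_vert(neighb_dict: dict):
--     '''Memoized chain resolution: each vertex's path is built once from its
--     successor's cached path instead of re-walking the whole chain per vertex.'''
--     cache = {}
--     for i in neighb_dict:
--         # walk up the chain collecting uncached vertices until a cached or terminal one
--         stack = []
--         k = i
--         while k not in cache:
--             stack.append(k)
--             nxt = neighb_dict[k]
--             if not nxt:
--                 cache[k] = [k]
--                 break
--             k = nxt
--         # fill the collected vertices back-to-front from the cached successor paths
--         for k in reversed(stack):
--             nxt = neighb_dict[k]
--             if nxt:
--                 cache[k] = cache[nxt] + [k]
--     return {i: cache[i] for i in neighb_dict}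
-- ===== Notes on version B (the rewrite author's own statement) =====
-- stated objective: faster
-- what changed: A re-walks the whole successor chain from scratch for every vertex; B resolves each vertex once with a memoized cache, pushing only uncached vertices on an explicit stack and building each path from its successor's cached path.
-- outside the precondition, e.g. on __get_full_path_vert({1: 2}): A raises KeyError, B raises KeyError
import Mathlib
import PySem

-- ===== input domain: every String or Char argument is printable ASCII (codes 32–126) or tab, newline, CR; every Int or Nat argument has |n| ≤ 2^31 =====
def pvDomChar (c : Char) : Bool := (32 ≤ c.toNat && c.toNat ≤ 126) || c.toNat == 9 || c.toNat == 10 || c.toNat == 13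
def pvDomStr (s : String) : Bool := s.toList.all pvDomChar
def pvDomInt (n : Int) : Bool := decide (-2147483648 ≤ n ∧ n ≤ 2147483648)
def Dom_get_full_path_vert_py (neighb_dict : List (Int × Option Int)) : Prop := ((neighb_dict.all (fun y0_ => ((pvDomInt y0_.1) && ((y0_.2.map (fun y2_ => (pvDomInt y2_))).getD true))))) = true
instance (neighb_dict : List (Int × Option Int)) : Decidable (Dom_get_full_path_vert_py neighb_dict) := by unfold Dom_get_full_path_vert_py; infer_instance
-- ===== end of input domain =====

-- B replaces A's independent per-vertex re-walk of the whole successor chain by memoized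
-- resolution: each vertex's path is built once from its successor's cached path (objective: faster).

-- ===== PORT A =====
-- A's while loop 'while neighb_dict[k]: lst.append(neighb_dict[k]); k = lst[-1]' as fuel recursion
-- (a missing key is Python's KeyError, excluded by Pre_; the port just stops there)
def pvChainA (d : PySem.Dict Int (Option Int)) : Nat → Int → List Int → List Int
  | 0, _, lst => lst
  | n+1, k, lst =>
    match d.get? k with
    | some (some v) => if v = 0 then lst else pvChainA d n v (lst ++ [v])
    | _ => lst

def get_full_path_vert_py (neighb_dict : List (Int × Option Int)) : List (Int × List Int) :=
  let d := PySem.Dict.ofList neighb_dict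
  (d.keys.foldl (fun dict_path i =>
      let lst := pvChainA d (neighb_dict.length + 1) i []
      -- lst.insert(0, i); dict_path[i] = lst[::-1]
      dict_path.insert i ((i :: lst).reverse))
    PySem.Dict.empty).items

-- ===== PORT B =====
-- Source B's 'while k not in cache' walk as fuel recursion (missing key = KeyError, excluded by Pre_)
def pvWalkB (d : PySem.Dict Int (Option Int)) : Nat → Int → List Int → PySem.Dict Int (List Int) →
    List Int × PySem.Dict Int (List Int)
  | 0, _, stack, c => (stack, c)
  | n+1, k, stack, c =>
    if (c.get? k).isSome then (stack, c)
    else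
      match d.get? k with
      | some (some v) =>
        if v = 0 then (stack ++ [k], c.insert k [k]) else pvWalkB d n v (stack ++ [k]) c
      | _ => (stack ++ [k], c.insert k [k])

-- Source B's 'for k in reversed(stack)' fill loop (cache[nxt] is provably present under Pre_; getD stands in)
def pvFillB (d : PySem.Dict Int (Option Int)) (stack : List Int) (c : PySem.Dict Int (List Int)) :
    PySem.Dict Int (List Int) :=
  stack.reverse.foldl (fun c k =>
    match d.get? k with
    | some (some v) => if v = 0 then c else c.insert k ((c.getD v []) ++ [k])
    | _ => c) c

def get_full_path_vert_py_alt (neighb_dict : List (Int × Option Int)) : List (Int × List Int) :=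
  let d := PySem.Dict.ofList neighb_dict
  let cache := d.keys.foldl (fun c i =>
      let p := pvWalkB d (neighb_dict.length + 1) i [] c
      pvFillB d p.1 p.2) PySem.Dict.empty
  (d.keys.foldl (fun dp i => dp.insert i (cache.getD i [])) PySem.Dict.empty).items

-- ===== PRECONDITION & SPEC =====
-- one step of the successor chain (stalls on a falsy or missing successor)
def pvStep (d : PySem.Dict Int (Option Int)) (k : Int) : Int :=
  match d.get? k with
  | some (some v) => if v = 0 then k else v
  | _ => k

-- 'the chain is finished at k': k is a key whose value is falsy (None or 0)
def pvStopOK (d : PySem.Dict Int (Option Int)) (k : Int) : Prop :=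
  d.get? k = some none ∨ d.get? k = some (some 0)

-- Pre_ excludes exactly the inputs on which the Python A raises KeyError (a truthy successor that
-- is not a key) or loops forever (a successor cycle): from every key, iterating the step function
-- |dict| times must land on a key whose value is falsy (None or 0).
def Pre_get_full_path_vert_py (neighb_dict : List (Int × Option Int)) : Prop :=
  ∀ i ∈ (PySem.Dict.ofList neighb_dict).keys,
    pvStopOK (PySem.Dict.ofList neighb_dict)
      ((pvStep (PySem.Dict.ofList neighb_dict))^[neighb_dict.length] i)

instance (neighb_dict : List (Int × Option Int)) : Decidable (Pre_get_full_path_vert_py neighb_dict) := by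
  unfold Pre_get_full_path_vert_py pvStopOK; infer_instance

def pvWitness_get_full_path_vert_py : (List (Int × Option Int)) :=
  [(1, some 2), (2, some (-3)), (-3, none), (7, some 0)]

def Spec_get_full_path_vert_py (neighb_dict : List (Int × Option Int)) (out : List (Int × List Int)) : Prop := out = get_full_path_vert_py_alt neighb_dict
instance (neighb_dict : List (Int × Option Int)) (out : List (Int × List Int)) : Decidable (Spec_get_full_path_vert_py neighb_dict out) := by unfold Spec_get_full_path_vert_py; infer_instance

-- ===== CLAIM (what is proved, stated in full; the proofs are below) =====
def Claim_equal_get_full_path_vert_py : Prop := ∀ (neighb_dict : List (Int × Option Int)), Dom_get_full_path_vert_py neighb_dict → Pre_get_full_path_vert_py neighb_dict → Spec_get_full_path_vert_py neighb_dict (get_full_path_vert_py neighb_dict)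

-- ===== LEMMAS AND PROOFS =====

-- the chain is finished within n steps from k
def pvStop (d : PySem.Dict Int (Option Int)) (n : Nat) (k : Int) : Prop :=
  pvStopOK d ((pvStep d)^[n] k)

-- the intended path of a vertex, as plain fuel recursion (proof-only specification)
def pvPathS (d : PySem.Dict Int (Option Int)) : Nat → Int → List Int
  | 0, k => [k]
  | n+1, k =>
    match d.get? k with
    | some (some v) => if v = 0 then [k] else pvPathS d n v ++ [k]
    | _ => [k]

-- the cache is correct: every entry is the spec path of a finished vertex
def pvGood (d : PySem.Dict Int (Option Int)) (c : PySem.Dict Int (List Int)) : Prop :=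
  ∀ k r, c.get? k = some r → ∃ m, pvStop d m k ∧ r = pvPathS d m k

theorem pvStep_fixed_of_stopOK {d : PySem.Dict Int (Option Int)} {k : Int}
    (h : pvStopOK d k) : pvStep d k = k := by
  rcases h with h | h <;> simp [pvStep, h]

theorem pvStop_mono {d : PySem.Dict Int (Option Int)} {n m : Nat} {k : Int}
    (h : pvStop d n k) (hnm : n ≤ m) : pvStop d m k := by
  induction m, hnm using Nat.le_induction with
  | base => exact h
  | succ m _ ih =>
    unfold pvStop at ih ⊢
    rw [Function.iterate_succ_apply', pvStep_fixed_of_stopOK ih]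
    exact ih

theorem pvStop_succ_of_truthy {d : PySem.Dict Int (Option Int)} {n : Nat} {k v : Int}
    (hk : d.get? k = some (some v)) (hv : v ≠ 0) (h : pvStop d (n+1) k) : pvStop d n v := by
  unfold pvStop at h ⊢
  rwa [Function.iterate_succ_apply, show pvStep d k = v by simp [pvStep, hk, hv]] at h

theorem pvPathS_falsy {d : PySem.Dict Int (Option Int)} {k : Int} (m : Nat)
    (h : d.get? k = some none ∨ d.get? k = some (some 0)) : pvPathS d m k = [k] := by
  cases m with
  | zero => rfl
  | succ m => rcases h with h | h <;> simp [pvPathS, h]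

theorem pvPathS_stable {d : PySem.Dict Int (Option Int)} :
    ∀ {n : Nat} {k : Int}, pvStop d n k → ∀ {m : Nat}, n ≤ m → pvPathS d m k = pvPathS d n k := by
  intro n
  induction n with
  | zero =>
    intro k h m _
    exact (pvPathS_falsy m h).trans (pvPathS_falsy 0 h).symm
  | succ n ih =>
    intro k h m hm
    rcases hk : d.get? k with _ | ov
    · exact absurd h (by
        have hfix : pvStep d k = k := by simp [pvStep, hk]
        unfold pvStop
        rw [Function.iterate_fixed hfix]
        rintro (h' | h') <;> simp [hk] at h')
    · rcases ov with _ | v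
      · exact (pvPathS_falsy m (Or.inl hk)).trans (pvPathS_falsy (n+1) (Or.inl hk)).symm
      · by_cases hv : v = 0
        · subst hv
          exact (pvPathS_falsy m (Or.inr hk)).trans (pvPathS_falsy (n+1) (Or.inr hk)).symm
        · obtain ⟨m', rfl⟩ : ∃ m', m = m' + 1 := ⟨m - 1, by omega⟩
          have hsv : pvStop d n v := pvStop_succ_of_truthy hk hv h
          simp only [pvPathS, hk, if_neg hv]
          rw [ih hsv (by omega)]

theorem pvPathS_eq_of_stop₂ {d : PySem.Dict Int (Option Int)} {a b : Nat} {k : Int}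
    (ha : pvStop d a k) (hb : pvStop d b k) : pvPathS d a k = pvPathS d b k := by
  rcases Nat.le_total a b with h | h
  · exact (pvPathS_stable hb (le_refl b)).symm ▸ (pvPathS_stable ha h).symm
  · exact pvPathS_stable hb h

-- missing key: the chain never finishes
theorem pvStop_not_of_missing {d : PySem.Dict Int (Option Int)} {k : Int}
    (hk : d.get? k = none) (n : Nat) : ¬ pvStop d n k := by
  have hfix : pvStep d k = k := by simp [pvStep, hk]
  unfold pvStop
  rw [Function.iterate_fixed hfix]
  intro h
  rcases h with h | h <;> simp [hk] at h

-- ===== A-side characterisation =====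
theorem pvChainA_acc (d : PySem.Dict Int (Option Int)) :
    ∀ (n : Nat) (k : Int) (lst : List Int), pvChainA d n k lst = lst ++ pvChainA d n k [] := by
  intro n
  induction n with
  | zero => intro k lst; simp [pvChainA]
  | succ n ih =>
    intro k lst
    rcases hk : d.get? k with _ | ov
    · simp [pvChainA, hk]
    · rcases ov with _ | v
      · simp [pvChainA, hk]
      · by_cases hv : v = 0
        · subst hv; simp [pvChainA, hk]
        · simp only [pvChainA, hk, if_neg hv]
          rw [ih v (lst ++ [v]), ih v ([] ++ [v])]
          simp

theorem pvChainA_reverse (d : PySem.Dict Int (Option Int)) :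
    ∀ (n : Nat) (k : Int), (k :: pvChainA d n k []).reverse = pvPathS d n k := by
  intro n
  induction n with
  | zero => intro k; simp [pvChainA, pvPathS]
  | succ n ih =>
    intro k
    rcases hk : d.get? k with _ | ov
    · simp [pvChainA, pvPathS, hk]
    · rcases ov with _ | v
      · simp [pvChainA, pvPathS, hk]
      · by_cases hv : v = 0
        · subst hv; simp [pvChainA, pvPathS, hk]
        · simp only [pvChainA, pvPathS, hk, if_neg hv]
          rw [pvChainA_acc d n v ([] ++ [v])]
          simp only [List.nil_append, List.singleton_append]
          rw [List.reverse_cons, ih v]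

-- ===== B-side lemmas =====
theorem pvFillB_nil (d : PySem.Dict Int (Option Int)) (c : PySem.Dict Int (List Int)) :
    pvFillB d [] c = c := rfl

theorem pvFillB_append (d : PySem.Dict Int (Option Int)) (s t : List Int)
    (c : PySem.Dict Int (List Int)) : pvFillB d (s ++ t) c = pvFillB d s (pvFillB d t c) := by
  unfold pvFillB
  rw [List.reverse_append, List.foldl_append]

theorem pvWalkB_acc (d : PySem.Dict Int (Option Int)) :
    ∀ (n : Nat) (k : Int) (stack : List Int) (c : PySem.Dict Int (List Int)),
      pvWalkB d n k stack c =
        (stack ++ (pvWalkB d n k [] c).1, (pvWalkB d n k [] c).2) := by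
  intro n
  induction n with
  | zero => intro k stack c; simp [pvWalkB]
  | succ n ih =>
    intro k stack c
    by_cases hc : (c.get? k).isSome
    · simp [pvWalkB, hc]
    · rcases hk : d.get? k with _ | ov
      · simp [pvWalkB, hc, hk]
      · rcases ov with _ | v
        · simp [pvWalkB, hc, hk]
        · by_cases hv : v = 0
          · subst hv; simp [pvWalkB, hc, hk]
          · simp only [pvWalkB, hc, hk, if_neg hv, Bool.false_eq_true, if_false]
            rw [ih v (stack ++ [k]), ih v ([] ++ [k])]
            simp

-- ===== the per-key walk+fill lemma =====
theorem pvWF (d : PySem.Dict Int (Option Int)) :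
    ∀ (n m : Nat) (k : Int) (c : PySem.Dict Int (List Int)), n < m →
      pvStop d n k → pvGood d c →
      pvGood d (pvFillB d (pvWalkB d m k [] c).1 (pvWalkB d m k [] c).2) ∧
      (((pvFillB d (pvWalkB d m k [] c).1 (pvWalkB d m k [] c).2).get? k).isSome) ∧
      (∀ x, (c.get? x).isSome →
        (((pvFillB d (pvWalkB d m k [] c).1 (pvWalkB d m k [] c).2).get? x).isSome)) := by
  intro n
  induction n with
  | zero =>
    intro m k c hm h hg
    obtain ⟨m', rfl⟩ : ∃ m', m = m' + 1 := ⟨m - 1, by omega⟩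
    by_cases hc : (c.get? k).isSome
    · simp only [pvWalkB, hc, if_true]
      rw [pvFillB_nil]
      exact ⟨hg, hc, fun x hx => hx⟩
    · have hstop : pvStopOK d k := h
      rcases hstop with hk | hk
      · simp only [pvWalkB, hc, Bool.false_eq_true, if_false, hk]
        have hfill : pvFillB d [k] (c.insert k [k]) = c.insert k [k] := by
          simp [pvFillB, hk]
        rw [show ([] ++ [k] : List Int) = [k] from rfl, hfill]
        refine ⟨?_, by simp [PySem.Dict.get?_insert_self], ?_⟩
        · intro k' r' h'
          rw [PySem.Dict.get?_insert] at h'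
          split at h'
          · subst ‹k' = k›
            exact ⟨0, Or.inl hk, by simpa [pvPathS] using h'.symm⟩
          · exact hg k' r' h'
        · intro x hx
          rw [PySem.Dict.get?_insert]
          split <;> simp [hx]
      · simp only [pvWalkB, hc, Bool.false_eq_true, if_false, hk, if_true]
        have hfill : pvFillB d [k] (c.insert k [k]) = c.insert k [k] := by
          simp [pvFillB, hk]
        rw [show ([] ++ [k] : List Int) = [k] from rfl, hfill]
        refine ⟨?_, by simp [PySem.Dict.get?_insert_self], ?_⟩
        · intro k' r' h'
          rw [PySem.Dict.get?_insert] at h'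
          split at h'
          · subst ‹k' = k›
            exact ⟨0, Or.inr hk, by simpa [pvPathS] using h'.symm⟩
          · exact hg k' r' h'
        · intro x hx
          rw [PySem.Dict.get?_insert]
          split <;> simp [hx]
  | succ n ih =>
    intro m k c hm h hg
    obtain ⟨m', rfl⟩ : ∃ m', m = m' + 1 := ⟨m - 1, by omega⟩
    by_cases hc : (c.get? k).isSome
    · simp only [pvWalkB, hc, if_true]
      rw [pvFillB_nil]
      exact ⟨hg, hc, fun x hx => hx⟩
    · rcases hk : d.get? k with _ | ov
      · exact absurd h (pvStop_not_of_missing hk (n+1))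
      · rcases ov with _ | v
        · -- value None: same as finished
          simp only [pvWalkB, hc, Bool.false_eq_true, if_false, hk]
          have hfill : pvFillB d [k] (c.insert k [k]) = c.insert k [k] := by
            simp [pvFillB, hk]
          rw [show ([] ++ [k] : List Int) = [k] from rfl, hfill]
          refine ⟨?_, by simp [PySem.Dict.get?_insert_self], ?_⟩
          · intro k' r' h'
            rw [PySem.Dict.get?_insert] at h'
            split at h'
            · subst ‹k' = k›
              exact ⟨0, Or.inl hk, by simpa [pvPathS] using h'.symm⟩
            · exact hg k' r' h'
          · intro x hx
            rw [PySem.Dict.get?_insert]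
            split <;> simp [hx]
        · by_cases hv : v = 0
          · subst hv
            simp only [pvWalkB, hc, Bool.false_eq_true, if_false, hk, if_true]
            have hfill : pvFillB d [k] (c.insert k [k]) = c.insert k [k] := by
              simp [pvFillB, hk]
            rw [show ([] ++ [k] : List Int) = [k] from rfl, hfill]
            refine ⟨?_, by simp [PySem.Dict.get?_insert_self], ?_⟩
            · intro k' r' h'
              rw [PySem.Dict.get?_insert] at h'
              split at h'
              · subst ‹k' = k›
                exact ⟨0, Or.inr hk, by simpa [pvPathS] using h'.symm⟩
              · exact hg k' r' h'
            · intro x hx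
              rw [PySem.Dict.get?_insert]
              split <;> simp [hx]
          · -- truthy successor: recurse and extend the cached successor path
            have hsv : pvStop d n v := pvStop_succ_of_truthy hk hv h
            have hrec := ih m' v c (by omega) hsv hg
            simp only [pvWalkB, hc, Bool.false_eq_true, if_false, hk, if_neg hv]
            rw [pvWalkB_acc d m' v ([] ++ [k]) c]
            rw [show (([] ++ [k]) ++ (pvWalkB d m' v [] c).1) = [k] ++ (pvWalkB d m' v [] c).1 from by simp]
            rw [pvFillB_append]
            set c2 := pvFillB d (pvWalkB d m' v [] c).1 (pvWalkB d m' v [] c).2 with hc2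
            obtain ⟨hg2, hv2, hmono2⟩ := hrec
            obtain ⟨r, hr⟩ := Option.isSome_iff_exists.mp hv2
            obtain ⟨mv, hmvstop, hrval⟩ := hg2 v r hr
            have hfill : pvFillB d [k] c2 = c2.insert k ((c2.getD v []) ++ [k]) := by
              simp [pvFillB, hk, hv]
            rw [hfill]
            have hgetD : c2.getD v [] = r := PySem.Dict.getD_of_get?_eq_some _ _ hr
            have hnewstop : pvStop d (mv + 1) k := by
              unfold pvStop
              rw [Function.iterate_succ_apply, show pvStep d k = v by simp [pvStep, hk, hv]]
              exact hmvstop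
            have hnewval : (c2.getD v []) ++ [k] = pvPathS d (mv + 1) k := by
              rw [hgetD, hrval]
              simp [pvPathS, hk, hv]
            refine ⟨?_, by simp [PySem.Dict.get?_insert_self], ?_⟩
            · intro k' r' h'
              rw [PySem.Dict.get?_insert] at h'
              split at h'
              · subst ‹k' = k›
                exact ⟨mv + 1, hnewstop, by rw [← hnewval, ← Option.some_inj, h']⟩
              · exact hg2 k' r' h'
            · intro x hx
              rw [PySem.Dict.get?_insert]
              split
              · simp
              · simp [hmono2 x hx]

-- the empty cache is correct
theorem pvGood_empty (d : PySem.Dict Int (Option Int)) : pvGood d PySem.Dict.empty := by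
  intro k r h
  rw [PySem.Dict.get?_empty] at h
  cases h

-- the whole cache-building fold: correct cache containing every processed key
theorem pvCacheFold (d : PySem.Dict Int (Option Int)) (L : Nat) :
    ∀ (ks : List Int), (∀ i ∈ ks, pvStop d L i) → ∀ (c : PySem.Dict Int (List Int)), pvGood d c →
      pvGood d (ks.foldl (fun c i => pvFillB d (pvWalkB d (L+1) i [] c).1 (pvWalkB d (L+1) i [] c).2) c) ∧
      (∀ x, (c.get? x).isSome →
        ((ks.foldl (fun c i => pvFillB d (pvWalkB d (L+1) i [] c).1 (pvWalkB d (L+1) i [] c).2) c).get? x).isSome) ∧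
      (∀ i ∈ ks,
        ((ks.foldl (fun c i => pvFillB d (pvWalkB d (L+1) i [] c).1 (pvWalkB d (L+1) i [] c).2) c).get? i).isSome) := by
  intro ks
  induction ks with
  | nil => intro _ c hg; exact ⟨hg, fun x hx => hx, by simp⟩
  | cons i ks ih =>
    intro hs c hg
    have hW := pvWF d L (L+1) i c (by omega) (hs i (by simp)) hg
    obtain ⟨hg1, hi1, hmono1⟩ := hW
    have hIH := ih (fun j hj => hs j (by simp [hj])) _ hg1
    obtain ⟨hg2, hmono2, hmem2⟩ := hIH
    simp only [List.foldl_cons]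
    refine ⟨hg2, fun x hx => hmono2 x (hmono1 x hx), ?_⟩
    intro j hj
    rcases List.mem_cons.mp hj with rfl | hj
    · exact hmono2 j hi1
    · exact hmem2 j hj

-- ===== VERDICT (by name: the statement is the Claim_ definition above) =====
theorem get_full_path_vert_py_spec : Claim_equal_get_full_path_vert_py := by
  intro nd _ hpre
  unfold Spec_get_full_path_vert_py
  simp only [get_full_path_vert_py, get_full_path_vert_py_alt]
  have hstop : ∀ i ∈ (PySem.Dict.ofList nd).keys,
      pvStop (PySem.Dict.ofList nd) nd.length i := hpre
  set d := PySem.Dict.ofList nd with hd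
  obtain ⟨hgood, _, hmem⟩ :=
    pvCacheFold d nd.length d.keys hstop PySem.Dict.empty (pvGood_empty d)
  set cache := d.keys.foldl
      (fun c i => pvFillB d (pvWalkB d (nd.length+1) i [] c).1 (pvWalkB d (nd.length+1) i [] c).2)
      PySem.Dict.empty with hcache
  congr 1
  refine (PySem.List.foldl_congr_mem _ _ (fun dp i => dp.insert i (pvPathS d (nd.length+1) i)) _ ?_).trans (PySem.List.foldl_congr_mem _ _ _ _ ?_)
  · -- A's fold computes the spec path
    intro acc i hi
    rw [pvChainA_reverse d (nd.length+1) i]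
  · -- B's lookup fold returns the same spec path
    intro acc i hi
    obtain ⟨r, hr⟩ := Option.isSome_iff_exists.mp (hmem i hi)
    obtain ⟨mv, hmv, hrval⟩ := hgood i r hr
    rw [PySem.Dict.getD_of_get?_eq_some _ ([] : List Int) hr, hrval,
      pvPathS_eq_of_stop₂ hmv (pvStop_mono (n := nd.length) (m := nd.length + 1) (hstop i hi) (Nat.le_succ _))]
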